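-- pv_equiv track=rewrite | github.com/NikoSokratous/EthereumNetworkAnalysis | top10contracts.py | reducer1
-- ===== SOURCE A (Python) =====
-- def reducer1(key, elements):
-- 	iscontract = False
-- 	values = []
-- 	for element in elements:
-- 		if element[0]==1:
-- 			values.append(element[1])
-- 		elif element[0] == 2:
-- 			iscontract = True
-- 	if iscontract:
-- 		yield key, sum(values)
-- ===== SOURCE B (Python) =====
-- def reducer1(key, elements):
--     # Group-aggregate: one dict of running totals keyed by tag, then read the
--     # answer off the dict (tag 2 present?  total of tag 1).
--     totals = {}
--     for tag, value in elements:
--         totals[tag] = totals.get(tag, 0) + value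
--     if 2 in totals:
--         yield key, totals.get(1, 0)
-- ===== Notes on version B (the rewrite author's own statement) =====
-- stated objective: alternative
-- what changed: Replaces A's flag-plus-appended-list accumulator with a dict of per-tag running totals built once; the result is then read off the dict (key 2 present, total at key 1) instead of flag-checking and summing a list.
import Mathlib
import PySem

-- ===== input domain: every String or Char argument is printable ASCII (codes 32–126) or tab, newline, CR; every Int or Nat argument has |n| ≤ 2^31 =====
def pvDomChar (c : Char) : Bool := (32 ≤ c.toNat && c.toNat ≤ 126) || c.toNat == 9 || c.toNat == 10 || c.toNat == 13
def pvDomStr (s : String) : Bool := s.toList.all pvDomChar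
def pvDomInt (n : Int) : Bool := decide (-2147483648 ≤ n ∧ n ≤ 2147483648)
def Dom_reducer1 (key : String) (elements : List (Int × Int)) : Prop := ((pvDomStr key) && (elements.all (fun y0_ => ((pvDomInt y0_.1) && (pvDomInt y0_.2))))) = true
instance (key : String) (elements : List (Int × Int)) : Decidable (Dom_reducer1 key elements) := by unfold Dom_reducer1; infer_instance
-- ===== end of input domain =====

-- B replaces A's flag-plus-appended-list accumulator with a dict of per-tag running totals,
-- reading the answer off the dict afterwards; objective: alternative, same cost.

-- ===== PORT A =====
-- Port of A: one pass maintaining (iscontract, values); yield (key, sum values) if iscontract.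
def reducer1 (key : String) (elements : List (Int × Int)) : List (String × Int) :=
  let st := elements.foldl (fun (s : Bool × List Int) e =>
    if e.1 = 1 then (s.1, s.2 ++ [e.2])
    else if e.1 = 2 then (true, s.2)
    else s) (false, [])
  if st.1 then [(key, st.2.sum)] else []

-- ===== PORT B =====
-- Port of B: build a dict of per-tag running totals, then read the answer off the dict.
def reducer1_alt (key : String) (elements : List (Int × Int)) : List (String × Int) :=
  let totals := elements.foldl
    (fun (d : PySem.Dict Int Int) e => d.insert e.1 (d.getD e.1 0 + e.2)) PySem.Dict.empty
  if totals.contains 2 then [(key, totals.getD 1 0)] else []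

-- ===== PRECONDITION & SPEC =====
def Spec_reducer1 (key : String) (elements : List (Int × Int)) (out : List (String × Int)) : Prop := out = reducer1_alt key elements
instance (key : String) (elements : List (Int × Int)) (out : List (String × Int)) : Decidable (Spec_reducer1 key elements out) := by unfold Spec_reducer1; infer_instance

-- ===== CLAIM (what is proved, stated in full; the proofs are below) =====
def Claim_equal_reducer1 : Prop := ∀ (key : String) (elements : List (Int × Int)), Dom_reducer1 key elements → Spec_reducer1 key elements (reducer1 key elements)

-- ===== LEMMAS AND PROOFS =====

-- A's fold from an arbitrary state: flag = (old ∨ some tag 2), values = old ++ tag-1 values.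
theorem reducer1_fold_char (elements : List (Int × Int)) (b : Bool) (vs : List Int) :
    elements.foldl (fun (s : Bool × List Int) e =>
      if e.1 = 1 then (s.1, s.2 ++ [e.2])
      else if e.1 = 2 then (true, s.2)
      else s) (b, vs)
    = ((b || elements.any (fun e => e.1 == 2)),
       vs ++ (elements.filter (fun e => e.1 == 1)).map (fun e => e.2)) := by
  induction elements generalizing b vs with
  | nil => simp
  | cons e tl ih =>
    simp only [List.foldl_cons, List.any_cons, List.filter_cons]
    by_cases h1 : e.1 = 1
    · simp [h1, ih, List.append_assoc]
    · by_cases h2 : e.1 = 2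
      · simp [h2, ih]
      · have h2' : (e.1 == 2) = false := by simp [h2]
        simp [h1, h2, h2', ih]

-- B's dict loop: lookup at t is the old value plus the sum of tag-t values.
theorem totals_getD (l : List (Int × Int)) (d : PySem.Dict Int Int) (t : Int) :
    (l.foldl (fun (d : PySem.Dict Int Int) e => d.insert e.1 (d.getD e.1 0 + e.2)) d).getD t 0
    = d.getD t 0 + ((l.filter (fun e => e.1 == t)).map (fun e => e.2)).sum := by
  induction l generalizing d with
  | nil => simp
  | cons e tl ih =>
    simp only [List.foldl_cons, List.filter_cons, ih]
    by_cases h : e.1 = t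
    · simp [h]; ring
    · have h' : (e.1 == t) = false := by simp [h]
      simp [h', PySem.Dict.getD_insert, Ne.symm h]

-- B's dict loop: key t present iff already present or some element has tag t.
theorem totals_contains (l : List (Int × Int)) (d : PySem.Dict Int Int) (t : Int) :
    (l.foldl (fun (d : PySem.Dict Int Int) e => d.insert e.1 (d.getD e.1 0 + e.2)) d).contains t
    = (d.contains t || l.any (fun e => e.1 == t)) := by
  induction l generalizing d with
  | nil => simp
  | cons e tl ih =>
    simp only [List.foldl_cons, List.any_cons, ih, PySem.Dict.contains_insert]
    by_cases h : e.1 = t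
    · simp [h]
    · have h' : (t == e.1) = false := by simp [Ne.symm h]
      have h'' : (e.1 == t) = false := by simp [h]
      simp [h', h'']

-- ===== VERDICT (by name: the statement is the Claim_ definition above) =====
theorem reducer1_spec : Claim_equal_reducer1 := by
  intro key elements _
  unfold Spec_reducer1
  simp only [reducer1, reducer1_alt, reducer1_fold_char, totals_getD, totals_contains,
    PySem.Dict.contains_empty, PySem.Dict.getD_empty, Bool.false_or, List.nil_append, zero_add]
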